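-- pv_equiv track=rewrite | github.com/novaji-introserve/matrics-app | compliance_management/services/query_service.py | _split_by_operator
-- ===== SOURCE A (Python) =====
-- def _split_by_operator(expr, operator):
--     """Split a SQL expression by an operator while respecting parentheses.
--
--     Args:
--         expr (str): The SQL expression to split.
--         operator (str): The operator to split by (AND/OR).
--
--     Returns:
--         list: A list of split expressions.
--     """
--     operator = f" {operator} "
--     parts = []
--     current_part = ""
--     paren_level = 0
--     quote_char = None
--     i = 0
--     while i < len(expr):
--         char = expr[i]
--         if char in ["'", '"'] and (i == 0 or expr[i - 1] != "\\"):
--             if quote_char is None: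
--                 quote_char = char
--             elif quote_char == char:
--                 quote_char = None
--         if quote_char is not None:
--             current_part += char
--             i += 1
--             continue
--         if char == "(":
--             paren_level += 1
--         elif char == ")":
--             paren_level -= 1
--         if (
--             paren_level == 0
--             and i + len(operator) <= len(expr)
--             and expr[i : i + len(operator)].upper() == operator
--         ):
--             parts.append(current_part.strip())
--             current_part = ""
--             i += len(operator)
--         else:
--             current_part += char
--             i += 1
--     if current_part:
--         parts.append(current_part.strip())
--     return parts
-- ===== SOURCE B (Python) =====
-- def _split_by_operator(expr, operator):
--     """Split a SQL expression by an operator while respecting parentheses.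
--
--     Different strategy: instead of testing every index for an operator match,
--     locate candidate matches with str.find on an uppercased copy, advance the
--     paren/quote state only over the gap between candidates, collect the
--     boundary indices, and finally carve expr into stripped slices.
--     """
--     op = " %s " % operator
--     m = len(op)
--     n = len(expr)
--     upper = expr.upper()
--     bounds = []
--     pl = 0
--     qc = None
--     pos = 0
--     while True:
--         j = upper.find(op, pos)
--         if j == -1:
--             break
--         # bring the paren/quote state up to index j
--         for i in range(pos, j):
--             c = expr[i]
--             if c in ("'", '"') and (i == 0 or expr[i - 1] != "\\"):
--                 if qc is None:
--                     qc = c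
--                 elif qc == c:
--                     qc = None
--             if qc is None:
--                 if c == "(":
--                     pl += 1
--                 elif c == ")":
--                     pl -= 1
--         if qc is None and pl == 0:
--             bounds.append(j)
--             pos = j + m
--         else:
--             pos = j + 1
--     parts = []
--     start = 0
--     for b in bounds:
--         parts.append(expr[start:b].strip())
--         start = b + m
--     last = expr[start:]
--     if last:
--         parts.append(last.strip())
--     return parts
-- ===== Notes on version B (the rewrite author's own statement) =====
-- stated objective: faster
-- what changed: A tests every index for an operator match (building a fresh substring and uppercasing it each time) while accumulating current_part character by character; B uppercases the string once, jumps between candidate matches with str.find, advances the paren/quote state only over the gaps to collect boundary indices, and finally carves expr into stripped slices.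
import Mathlib
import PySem

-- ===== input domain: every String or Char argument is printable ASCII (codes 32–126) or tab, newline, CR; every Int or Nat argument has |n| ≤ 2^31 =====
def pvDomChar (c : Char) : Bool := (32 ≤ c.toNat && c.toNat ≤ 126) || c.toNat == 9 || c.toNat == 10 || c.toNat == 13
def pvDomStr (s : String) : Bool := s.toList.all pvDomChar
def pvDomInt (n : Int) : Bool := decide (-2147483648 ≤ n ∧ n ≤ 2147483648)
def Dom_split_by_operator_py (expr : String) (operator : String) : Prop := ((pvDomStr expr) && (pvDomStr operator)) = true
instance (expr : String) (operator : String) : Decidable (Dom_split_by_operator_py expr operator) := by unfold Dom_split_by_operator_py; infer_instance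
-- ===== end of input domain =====

-- B replaces A's per-index operator test and char-by-char accumulation by str.find jumps
-- on an uppercased copy (collecting boundary indices) plus a final slicing pass.

-- ===== PORT A =====
-- Python's quote_char update for the character at index i (lines `if char in ["'", '"'] ...`).
def pvQuoteA (cs : List Char) (i : Nat) (qc : Option Char) : Option Char :=
  let c := cs[i]!
  if (c = '\'' ∨ c = '"') ∧ (i = 0 ∨ cs[i-1]! ≠ '\\') then
    match qc with
    | none => some c
    | some q => if q = c then none else some q
  else qc

-- Python's paren_level update (`if char == "(" ... elif char == ")" ...`).
def pvParenA (c : Char) (pl : Int) : Int :=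
  if c = '(' then pl + 1 else if c = ')' then pl - 1 else pl

-- A's while loop; `fuel` only bounds the iteration count (i strictly increases each
-- step, so fuel = |expr| + 1 suffices); each step is Python's loop body in order.
def splitLoopA (cs sep : List Char) (fuel : Nat) (parts : List String) (cur : List Char)
    (pl : Int) (qc : Option Char) (i : Nat) : List String :=
  match fuel with
  | 0 => if cur ≠ [] then parts ++ [String.ofList (PySem.Chars.strip cur)] else parts
  | fuel + 1 =>
    if h : i < cs.length then
      let c := cs[i]
      let qc' := pvQuoteA cs i qc
      if qc'.isSome then
        splitLoopA cs sep fuel parts (cur ++ [c]) pl qc' (i + 1)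
      else
        let pl' := pvParenA c pl
        if pl' = 0 ∧ i + sep.length ≤ cs.length ∧
            PySem.Chars.upper (PySem.List.slice cs (some (i : Int)) (some ((i : Int) + (sep.length : Int)))) = sep then
          splitLoopA cs sep fuel (parts ++ [String.ofList (PySem.Chars.strip cur)]) [] pl' qc' (i + sep.length)
        else
          splitLoopA cs sep fuel parts (cur ++ [c]) pl' qc' (i + 1)
    else
      if cur ≠ [] then parts ++ [String.ofList (PySem.Chars.strip cur)] else parts

def split_by_operator_py (expr : String) (operator : String) : List String :=
  splitLoopA expr.toList (' ' :: (operator.toList ++ [' '])) (expr.toList.length + 1) [] [] 0 none 0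

-- ===== PORT B =====
-- B's state step for one gap character (body of `for i in range(pos, j)`).
def pvStepB (cs : List Char) (st : Int × Option Char) (i : Nat) : Int × Option Char :=
  let c := cs[i]!
  let qc :=
    if c ≠ '\'' ∧ c ≠ '"' then st.2
    else if i ≠ 0 ∧ cs[i-1]! = '\\' then st.2
    else match st.2 with
      | none => some c
      | some q => if q = c then none else some q
  match qc with
  | none => (if c = '(' then st.1 + 1 else if c = ')' then st.1 - 1 else st.1, none)
  | some q => (st.1, some q)

-- B's `while True` candidate loop: jump to the next occurrence of op in the uppercased
-- text (upper.find(op, pos) → PySem.Chars.findFrom), advance the state over the gap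
-- (range(pos, j) ported as List.range' pos (j - pos)), keep j when the state accepts.
-- `fuel` only bounds the iteration count (pos strictly increases; |expr| + 1 suffices).
def pvBoundsB (cs up op : List Char) (fuel : Nat) (pos : Nat) (pl : Int) (qc : Option Char) : List Nat :=
  match fuel with
  | 0 => []
  | fuel + 1 =>
    let j := PySem.Chars.findFrom up op (pos : Int) none
    if j = -1 then []
    else
      let jn := j.toNat
      let st := (List.range' pos (jn - pos)).foldl (pvStepB cs) (pl, qc)
      if st.2 = none ∧ st.1 = 0 then
        jn :: pvBoundsB cs up op fuel (jn + op.length) st.1 st.2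
      else
        pvBoundsB cs up op fuel (jn + 1) st.1 st.2

def split_by_operator_py_alt (expr : String) (operator : String) : List String :=
  let cs := expr.toList
  let op := ' ' :: (operator.toList ++ [' '])
  let bounds := pvBoundsB cs (PySem.Chars.upper cs) op (cs.length + 1) 0 0 none
  let ps := bounds.foldl
    (fun (ps : List String × Nat) (b : Nat) =>
      (ps.1 ++ [String.ofList (PySem.Chars.strip (PySem.List.slice cs (some (ps.2 : Int)) (some (b : Int))))],
       b + op.length))
    (([] : List String), (0 : Nat))
  let last := PySem.List.slice cs (some (ps.2 : Int)) none
  if last ≠ [] then ps.1 ++ [String.ofList (PySem.Chars.strip last)] else ps.1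

-- ===== PRECONDITION & SPEC =====
def Spec_split_by_operator_py (expr : String) (operator : String) (out : List String) : Prop := out = split_by_operator_py_alt expr operator
instance (expr : String) (operator : String) (out : List String) : Decidable (Spec_split_by_operator_py expr operator out) := by unfold Spec_split_by_operator_py; infer_instance

-- ===== CLAIM (what is proved, stated in full; the proofs are below) =====
def Claim_equal_split_by_operator_py : Prop := ∀ (expr : String) (operator : String), Dom_split_by_operator_py expr operator → Spec_split_by_operator_py expr operator (split_by_operator_py expr operator)

-- ===== LEMMAS AND PROOFS =====

-- Proof-side bridge: the parts a boundary list denotes, with a pending prefix `cur`.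
def pvCarve (cs : List Char) (m : Nat) (cur : List Char) (start : Nat) : List Nat → List String
  | [] =>
    if cur ++ cs.drop start ≠ [] then [String.ofList (PySem.Chars.strip (cur ++ cs.drop start))] else []
  | b :: bs =>
    String.ofList (PySem.Chars.strip (cur ++ (cs.drop start).take (b - start))) :: pvCarve cs m [] (b + m) bs

theorem pvStepB_eq (cs : List Char) (pl : Int) (qc : Option Char) (i : Nat) :
    pvStepB cs (pl, qc) i =
      if (pvQuoteA cs i qc).isSome then (pl, pvQuoteA cs i qc)
      else (pvParenA cs[i]! pl, none) := by
  unfold pvStepB pvQuoteA pvParenA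
  rcases qc with _ | q <;> simp only [] <;> split_ifs <;> simp_all <;> tauto

theorem splitLoopA_ge (cs sep : List Char) (fuel : Nat) (parts : List String) (cur : List Char)
    (pl : Int) (qc : Option Char) (i : Nat) (h : cs.length ≤ i) :
    splitLoopA cs sep fuel parts cur pl qc i =
      if cur ≠ [] then parts ++ [String.ofList (PySem.Chars.strip cur)] else parts := by
  cases fuel with
  | zero => simp [splitLoopA]
  | succ fuel => rw [splitLoopA, dif_neg (by omega)]

theorem splitLoopA_fuel (cs sep : List Char) (hs : sep ≠ []) :
    ∀ (f f' : Nat) (parts : List String) (cur : List Char) (pl : Int) (qc : Option Char) (i : Nat),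
    cs.length < i + f → cs.length < i + f' →
    splitLoopA cs sep f parts cur pl qc i = splitLoopA cs sep f' parts cur pl qc i := by
  intro f
  induction f with
  | zero => intro f' parts cur pl qc i h h'; rw [splitLoopA_ge _ _ _ _ _ _ _ _ (by omega),
      splitLoopA_ge _ _ _ _ _ _ _ _ (by omega)]
  | succ f ih =>
    intro f' parts cur pl qc i h h'
    by_cases hi : i < cs.length
    · cases f' with
      | zero => omega
      | succ f' =>
        simp only [splitLoopA, dif_pos hi]
        have hsl : 0 < sep.length := List.length_pos_iff.mpr hs
        split
        · exact ih _ _ _ _ _ _ (by omega) (by omega)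
        · split
          · exact ih _ _ _ _ _ _ (by omega) (by omega)
          · exact ih _ _ _ _ _ _ (by omega) (by omega)
    · rw [splitLoopA_ge _ _ _ _ _ _ _ _ (by omega), splitLoopA_ge _ _ _ _ _ _ _ _ (by omega)]

theorem splitLoopA_append (cs sep : List Char) :
    ∀ (fuel : Nat) (parts : List String) (cur : List Char) (pl : Int) (qc : Option Char) (i : Nat),
    splitLoopA cs sep fuel parts cur pl qc i = parts ++ splitLoopA cs sep fuel [] cur pl qc i := by
  intro fuel
  induction fuel with
  | zero =>
    intro parts cur pl qc i
    simp only [splitLoopA]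
    split <;> simp
  | succ fuel ih =>
    intro parts cur pl qc i
    simp only [splitLoopA]
    split
    · split
      · rw [ih parts, ih []]
      · split
        · conv_lhs => rw [ih]
          conv_rhs => rw [ih]
          simp
        · rw [ih parts, ih []]
    · split <;> simp

-- `upperChar` fixes the four structural characters, so a position whose uppercased
-- character is a space holds none of them.
theorem pvNotSpecial (c : Char) (h : PySem.Chars.upperChar c = ' ') :
    c ≠ '(' ∧ c ≠ ')' ∧ c ≠ '\'' ∧ c ≠ '"' := by
  refine ⟨?_, ?_, ?_, ?_⟩ <;> intro he <;> rw [he] at h <;> exact absurd h (by decide)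

-- A's three-way operator test at index i holds a prefix of the uppercased tail and back.
theorem pvTestIffPrefix (cs sep : List Char) (i : Nat) (_hi : i + sep.length ≤ cs.length) :
    PySem.Chars.upper (PySem.List.slice cs (some (i : Int)) (some ((i : Int) + (sep.length : Int)))) = sep
      ↔ sep <+: (PySem.Chars.upper cs).drop i := by
  rw [PySem.List.slice_natCast_add, List.prefix_iff_eq_take]
  simp only [PySem.Chars.upper, ← List.map_drop, ← List.map_take]
  exact eq_comm

theorem pvCarve_shift (cs : List Char) (m : Nat) (cur : List Char) (i : Nat) (h : i < cs.length)
    (bs : List Nat) (hhd : ∀ b bs', bs = b :: bs' → i + 1 ≤ b) :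
    pvCarve cs m cur i bs = pvCarve cs m (cur ++ [cs[i]]) (i + 1) bs := by
  cases bs with
  | nil =>
    simp only [pvCarve, List.drop_eq_getElem_cons h]
    simp
  | cons b bs' =>
    have hb : i + 1 ≤ b := hhd b bs' rfl
    simp only [pvCarve, List.drop_eq_getElem_cons h]
    have hbi : b - i = (b - (i + 1)) + 1 := by omega
    rw [hbi, List.take_succ_cons]
    simp

theorem pvCarve_shiftK (cs : List Char) (m : Nat) :
    ∀ (k : Nat) (cur : List Char) (pos : Nat), pos + k ≤ cs.length →
    ∀ (bs : List Nat), (∀ b bs', bs = b :: bs' → pos + k ≤ b) →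
    pvCarve cs m cur pos bs = pvCarve cs m (cur ++ (cs.drop pos).take k) (pos + k) bs := by
  intro k
  induction k with
  | zero => intro cur pos h bs hhd; simp
  | succ k ih =>
    intro cur pos h bs hhd
    have hi : pos < cs.length := by omega
    rw [pvCarve_shift cs m cur pos hi bs (fun b bs' hb => by have := hhd b bs' hb; omega)]
    rw [ih (cur ++ [cs[pos]]) (pos + 1) (by omega) bs (fun b bs' hb => by have := hhd b bs' hb; omega)]
    rw [List.drop_eq_getElem_cons hi, List.take_succ_cons]
    simp [Nat.add_assoc, Nat.add_comm 1 k]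

theorem pvBoundsB_head_ge (cs up op : List Char) (hop : op ≠ []) :
    ∀ (fuel : Nat) (pos : Nat) (pl : Int) (qc : Option Char) (b : Nat) (bs : List Nat),
    pos ≤ up.length → pvBoundsB cs up op fuel pos pl qc = b :: bs → pos ≤ b := by
  intro fuel
  induction fuel with
  | zero => intro pos pl qc b bs _ h; simp [pvBoundsB] at h
  | succ fuel ih =>
    intro pos pl qc b bs hpos h
    simp only [pvBoundsB] at h
    by_cases hj : PySem.Chars.findFrom up op (pos : Int) none = -1
    · rw [if_pos hj] at h; exact absurd h (by simp)
    · rw [if_neg hj] at h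
      obtain ⟨h1, h2, _⟩ := PySem.Chars.findFrom_natCast_spec up op pos hpos hj
      set j := PySem.Chars.findFrom up op (pos : Int) none with hjdef
      have hposj : pos ≤ j.toNat := by omega
      have hol : 0 < op.length := List.length_pos_iff.mpr hop
      have hjm : j.toNat + op.length ≤ up.length := by
        have := h2.length_le; simp at this; omega
      split at h
      · cases h; exact hposj
      · exact le_trans (by omega) (ih (j.toNat + 1) _ _ b bs (by omega) h)

theorem pvAdvA (cs sep : List Char) (hs : sep ≠ []) :
    ∀ (k pos : Nat) (cur : List Char) (pl : Int) (qc : Option Char),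
    pos + k ≤ cs.length →
    (∀ t, t < k → ¬ (sep <+: (PySem.Chars.upper cs).drop (pos + t))) →
    splitLoopA cs sep (cs.length + 1) [] cur pl qc pos =
      splitLoopA cs sep (cs.length + 1) [] (cur ++ (cs.drop pos).take k)
        ((List.range' pos k).foldl (pvStepB cs) (pl, qc)).1
        ((List.range' pos k).foldl (pvStepB cs) (pl, qc)).2 (pos + k) := by
  intro k
  induction k with
  | zero => intro pos cur pl qc h hnm; simp
  | succ k ih =>
    intro pos cur pl qc h hnm
    have hi : pos < cs.length := by omega
    have hnot : ¬ (pvParenA cs[pos] pl = 0 ∧ pos + sep.length ≤ cs.length ∧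
        PySem.Chars.upper (PySem.List.slice cs (some (pos : Int)) (some ((pos : Int) + (sep.length : Int)))) = sep) := by
      rintro ⟨-, h2, h3⟩
      exact hnm 0 (by omega) (by
        have := (pvTestIffPrefix cs sep pos h2).mp h3
        simpa using this)
    have hstep : pvStepB cs (pl, qc) pos =
        if (pvQuoteA cs pos qc).isSome then (pl, pvQuoteA cs pos qc)
        else (pvParenA cs[pos]! pl, none) := pvStepB_eq cs pl qc pos
    rw [List.range'_succ, List.foldl_cons]
    have hdrop : (cs.drop pos).take (k + 1) = cs[pos] :: (cs.drop (pos + 1)).take k := by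
      rw [List.drop_eq_getElem_cons hi, List.take_succ_cons]
    conv_lhs => rw [splitLoopA]
    rw [dif_pos hi]
    simp only []
    by_cases hq : (pvQuoteA cs pos qc).isSome
    · rw [if_pos hq]
      rw [splitLoopA_fuel cs sep hs _ (cs.length + 1) _ _ _ _ _ (by omega) (by omega)]
      rw [ih (pos + 1) (cur ++ [cs[pos]]) pl (pvQuoteA cs pos qc) (by omega)
        (fun t ht => by have := hnm (t + 1) (by omega); simpa [Nat.add_assoc, Nat.add_comm 1 t] using this)]
      rw [hstep, if_pos hq]
      simp [hdrop, Nat.add_assoc, Nat.add_comm 1 k]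
    · rw [if_neg hq, if_neg hnot]
      rw [splitLoopA_fuel cs sep hs _ (cs.length + 1) _ _ _ _ _ (by omega) (by omega)]
      have hqn : pvQuoteA cs pos qc = none := Option.not_isSome_iff_eq_none.mp hq
      rw [ih (pos + 1) (cur ++ [cs[pos]]) (pvParenA cs[pos] pl) (pvQuoteA cs pos qc) (by omega)
        (fun t ht => by have := hnm (t + 1) (by omega); simpa [Nat.add_assoc, Nat.add_comm 1 t] using this)]
      rw [hstep, if_neg hq]
      rw [getElem!_pos cs pos hi]
      simp [hqn, hdrop, Nat.add_assoc, Nat.add_comm 1 k]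

theorem pvMainA (cs : List Char) (t : List Char) :
    ∀ (fuelB pos : Nat) (cur : List Char) (pl : Int) (qc : Option Char),
    pos ≤ cs.length → cs.length < pos + fuelB →
    splitLoopA cs (' ' :: t) (cs.length + 1) [] cur pl qc pos =
      pvCarve cs (' ' :: t).length cur pos
        (pvBoundsB cs (PySem.Chars.upper cs) (' ' :: t) fuelB pos pl qc) := by
  intro fuelB
  induction fuelB with
  | zero => intro pos cur pl qc h1 h2; omega
  | succ fuelB ih =>
    intro pos cur pl qc hpos hfuel
    have hs : (' ' :: t) ≠ [] := by simp
    set U := PySem.Chars.upper cs with hU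
    have hUlen : U.length = cs.length := by simp [hU, PySem.Chars.upper]
    simp only [pvBoundsB]
    by_cases hj : PySem.Chars.findFrom U (' ' :: t) (pos : Int) none = -1
    · rw [if_pos hj]
      have hnm : ¬ (' ' :: t) <:+: U.drop pos :=
        (PySem.Chars.findFrom_natCast_eq_neg_one_iff U (' ' :: t) pos (by omega)).mp hj
      have hnm' : ∀ t', t' < cs.length - pos → ¬ (' ' :: t) <+: U.drop (pos + t') := by
        intro t' _ hpre
        apply hnm
        have hsf : U.drop (pos + t') <:+ U.drop pos := by
          rw [← List.drop_drop]
          exact List.drop_suffix t' _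
        exact hpre.isInfix.trans hsf.isInfix
      rw [pvAdvA cs (' ' :: t) hs (cs.length - pos) pos cur pl qc (by omega) hnm']
      have hpk : pos + (cs.length - pos) = cs.length := by omega
      rw [hpk, splitLoopA_ge _ _ _ _ _ _ _ _ (le_refl _)]
      have htake : (cs.drop pos).take (cs.length - pos) = cs.drop pos := by
        apply List.take_of_length_le; simp
      rw [htake]
      simp only [pvCarve, List.nil_append]
    · rw [if_neg hj]
      obtain ⟨h1, h2, h3⟩ := PySem.Chars.findFrom_natCast_spec U (' ' :: t) pos (by omega) hj
      set j := PySem.Chars.findFrom U (' ' :: t) (pos : Int) none with hjdef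
      set jn := j.toNat with hjn
      have hposj : pos ≤ jn := by omega
      have hlen2 := h2.length_le
      rw [List.length_drop, hUlen] at hlen2
      simp only [List.length_cons] at hlen2
      have hjm : jn + (' ' :: t).length ≤ cs.length := by simp only [List.length_cons]; omega
      have hjlt : jn < cs.length := by omega
      have hnm' : ∀ t', t' < jn - pos → ¬ (' ' :: t) <+: U.drop (pos + t') :=
        fun t' ht' => h3 (pos + t') (by omega) (by omega)
      rw [pvAdvA cs (' ' :: t) hs (jn - pos) pos cur pl qc (by omega) hnm']
      have hpk : pos + (jn - pos) = jn := by omega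
      rw [hpk]
      set st := (List.range' pos (jn - pos)).foldl (pvStepB cs) (pl, qc) with hst
      set cur' := cur ++ (cs.drop pos).take (jn - pos) with hcur'
      have hUjlt : jn < U.length := by rw [hUlen]; exact hjlt
      have hUj : U[jn]'hUjlt = ' ' := by
        have hp2 := h2
        rw [List.drop_eq_getElem_cons hUjlt, List.cons_prefix_cons] at hp2
        exact hp2.1.symm
      have hupc : PySem.Chars.upperChar cs[jn] = ' ' := by
        have hmap : U[jn]'hUjlt = PySem.Chars.upperChar (cs[jn]'hjlt) := by
          simp only [hU, PySem.Chars.upper, List.getElem_map]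
        rw [hmap] at hUj; exact hUj
      obtain ⟨hc1, hc2, hc3, hc4⟩ := pvNotSpecial _ hupc
      have hqA : pvQuoteA cs jn st.2 = st.2 := by
        unfold pvQuoteA
        rw [getElem!_pos cs jn hjlt]
        rw [if_neg (by simp [hc3, hc4])]
      have hpA : pvParenA (cs[jn]'hjlt) st.1 = st.1 := by
        simp [pvParenA, hc1, hc2]
      conv_lhs => rw [splitLoopA]
      rw [dif_pos hjlt]
      simp only []
      rw [hqA]
      by_cases hacc : st.2 = none ∧ st.1 = 0
      · rw [if_pos hacc, hacc.1]
        rw [if_neg (by simp)]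
        rw [if_pos ⟨by rw [hpA, hacc.2], hjm, (pvTestIffPrefix cs (' ' :: t) jn hjm).mpr h2⟩]
        rw [splitLoopA_append]
        rw [splitLoopA_fuel cs _ hs _ (cs.length + 1) _ _ _ _ _
          (by simp only [List.length_cons]; omega) (by simp only [List.length_cons]; omega)]
        rw [ih (jn + (' ' :: t).length) [] (pvParenA (cs[jn]'hjlt) st.1) none (by omega)
          (by simp only [List.length_cons]; omega)]
        rw [hpA, hacc.2]
        simp only [pvCarve, hcur']
        simp
      · rw [if_neg hacc]
        have hrest : splitLoopA cs (' ' :: t) (cs.length) [] (cur' ++ [cs[jn]'hjlt]) st.1 st.2 (jn + 1) =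
            pvCarve cs (' ' :: t).length cur pos (pvBoundsB cs U (' ' :: t) fuelB (jn + 1) st.1 st.2) := by
          rw [splitLoopA_fuel cs _ hs _ (cs.length + 1) _ _ _ _ _ (by omega) (by omega)]
          rw [ih (jn + 1) (cur' ++ [cs[jn]'hjlt]) st.1 st.2 (by omega) (by omega)]
          have hhd : ∀ b bs', pvBoundsB cs U (' ' :: t) fuelB (jn + 1) st.1 st.2 = b :: bs' →
              pos + (jn + 1 - pos) ≤ b := by
            intro b bs' hb
            have := pvBoundsB_head_ge cs U (' ' :: t) hs fuelB (jn + 1) st.1 st.2 b bs' (by omega) hb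
            omega
          rw [pvCarve_shiftK cs (' ' :: t).length (jn + 1 - pos) cur pos (by omega) _ hhd]
          have htk : (cs.drop pos).take (jn + 1 - pos) = (cs.drop pos).take (jn - pos) ++ [cs[jn]'hjlt] := by
            rw [show jn + 1 - pos = (jn - pos) + 1 by omega, List.take_add_one]
            have hg : (cs.drop pos)[jn - pos]? = some (cs[jn]'hjlt) := by
              rw [List.getElem?_drop, show pos + (jn - pos) = jn by omega]
              exact List.getElem?_eq_getElem hjlt
            rw [hg]
            simp
          rw [show pos + (jn + 1 - pos) = jn + 1 by omega, htk, hcur']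
          simp
        by_cases hq2 : st.2.isSome
        · rw [if_pos hq2]
          exact hrest
        · have hqn : st.2 = none := Option.not_isSome_iff_eq_none.mp hq2
          have hpl : st.1 ≠ 0 := fun h0 => hacc ⟨hqn, h0⟩
          rw [if_neg hq2, if_neg (fun hx => hpl (by rw [hpA] at hx; exact hx.1)), hpA]
          exact hrest

theorem pvPass2 (cs : List Char) (m : Nat) :
    ∀ (bs : List Nat) (parts : List String) (start : Nat),
    (let ps := bs.foldl
        (fun (ps : List String × Nat) (b : Nat) =>
          (ps.1 ++ [String.ofList (PySem.Chars.strip (PySem.List.slice cs (some (ps.2 : Int)) (some (b : Int))))],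
           b + m))
        (parts, start)
     let last := PySem.List.slice cs (some (ps.2 : Int)) none
     if last ≠ [] then ps.1 ++ [String.ofList (PySem.Chars.strip last)] else ps.1) =
    parts ++ pvCarve cs m [] start bs := by
  intro bs
  induction bs with
  | nil =>
    intro parts start
    simp only [List.foldl_nil, PySem.List.slice_from_natCast, pvCarve, List.nil_append]
    split <;> simp
  | cons b bs ih =>
    intro parts start
    simp only [List.foldl_cons]
    rw [ih]
    simp [pvCarve, PySem.List.slice_natCast]

theorem split_by_operator_py_spec : Claim_equal_split_by_operator_py := by
  intro expr operator _
  unfold Spec_split_by_operator_py split_by_operator_py split_by_operator_py_alt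
  rw [pvMainA expr.toList (operator.toList ++ [' ']) (expr.toList.length + 1) 0 [] 0 none
    (by omega) (by omega)]
  rw [pvPass2]
  simp
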